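-- pv_equiv track=rewrite | github.com/mp-c3-h8/Advent-of-Code-2025 | day3/day3.py | calc_joltage
-- ===== SOURCE A (Python) =====
-- def calc_joltage(bank: list[int], n: int) -> int:
--     len_bank = len(bank)
--     res_indices = list(range(0, n))  # init result with leftmost n batteries (indices)
--
--     for i in range(1, len_bank):
--         for (j, res_index) in enumerate(res_indices):
--             if i <= res_index:
--                 break
--             dist = i+n-j
--             if bank[i] > bank[res_index] and dist-1 < len_bank:
--                 res_indices[j:] = list(range(i, dist))  # len(LHS) = n-j = len(RHS)
--                 break
--     return sum(10**(n-j-1)*bank[res_index] for (j, res_index) in enumerate(res_indices))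
-- ===== SOURCE B (Python) =====
-- def calc_joltage(bank: list[int], n: int) -> int:
--     # Monotonic-stack re-implementation: one left-to-right scan keeping the chosen
--     # indices; pop a weaker choice while enough elements remain to refill to n.
--     len_bank = len(bank)
--     stack = []
--     for i in range(len_bank):
--         while stack and bank[stack[-1]] < bank[i] and len(stack) - 1 + (len_bank - i) >= n:
--             stack.pop()
--         if len(stack) < n:
--             stack.append(i)
--     return sum(10**(n-j-1)*bank[idx] for (j, idx) in enumerate(stack))
-- ===== Notes on version B (the rewrite author's own statement) =====
-- stated objective: alternative
-- what changed: Replaced A's repeated inner rescan-and-overwrite of the n chosen indices (for every element it scans the result list from the left and rewrites a whole suffix with consecutive indices) by a single left-to-right monotonic-stack pass that pops a weaker choice while enough elements remain to refill to n, so each index is pushed and popped at most once; on large inputs both runtimes are dominated by the final 10**k big-int sum.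
import Mathlib
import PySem

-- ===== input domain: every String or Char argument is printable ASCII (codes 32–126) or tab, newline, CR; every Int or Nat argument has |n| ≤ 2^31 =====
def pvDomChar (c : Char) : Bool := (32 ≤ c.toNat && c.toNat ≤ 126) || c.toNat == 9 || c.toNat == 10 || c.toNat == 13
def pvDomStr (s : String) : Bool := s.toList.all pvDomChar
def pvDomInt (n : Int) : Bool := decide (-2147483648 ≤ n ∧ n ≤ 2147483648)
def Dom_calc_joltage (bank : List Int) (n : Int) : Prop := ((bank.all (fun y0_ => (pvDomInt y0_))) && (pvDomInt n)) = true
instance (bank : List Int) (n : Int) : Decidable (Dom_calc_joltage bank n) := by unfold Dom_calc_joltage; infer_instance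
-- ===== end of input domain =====

-- B replaces A's rescan-and-overwrite of the chosen-index list by a one-pass monotonic
-- stack (each index pushed/popped at most once); equivalence is proved on n ≤ len(bank).

-- ===== PORT A =====
-- inner 'for (j, res_index) in enumerate(res_indices)' loop with its two breaks;
-- returns the updated res_indices list (suffix overwrite res_indices[j:] = range(i, dist))
def pvInnerA (bank : List Int) (len_bank n i : Int) : Int → List Int → List Int
  | _, [] => []
  | j, r :: rest =>
    if i ≤ r then r :: rest
    else if PySem.List.pyGetD bank i 0 > PySem.List.pyGetD bank r 0 ∧ (i + n - j) - 1 < len_bank then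
      PySem.List.pyRange i (i + n - j) 1
    else r :: pvInnerA bank len_bank n i (j + 1) rest

-- 10**(n-j-1): on the admitted inputs j < n, so the exponent is never negative (.toNat exact)
def calc_joltage (bank : List Int) (n : Int) : Int :=
  let len_bank : Int := bank.length
  let res := (PySem.List.pyRange 1 len_bank 1).foldl
      (fun res i => pvInnerA bank len_bank n i 0 res) (PySem.List.pyRange 0 n 1)
  (PySem.List.enumerate res 0).foldl
      (fun acc jr => acc + 10 ^ (n - jr.1 - 1).toNat * PySem.List.pyGetD bank jr.2 0) 0

-- ===== PORT B =====
-- 'while stack and bank[stack[-1]] < bank[i] and len(stack)-1+(len_bank-i) >= n: stack.pop()'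
-- the while loop pops at most len(stack) times: fuel = the stack's length is exact
def pvPopB (bank : List Int) (len_bank n i : Int) : Nat → List Int → List Int
  | 0, st => st
  | _ + 1, [] => []
  | fuel + 1, t :: ts =>
    if PySem.List.pyGetD bank ((t :: ts).getLast (by simp)) 0 < PySem.List.pyGetD bank i 0 ∧
        ((t :: ts).length : Int) - 1 + (len_bank - i) ≥ n then
      pvPopB bank len_bank n i fuel (t :: ts).dropLast
    else t :: ts

-- one iteration of B's for-loop body
def pvStepB (bank : List Int) (len_bank n : Int) (st : List Int) (i : Int) : List Int :=
  let st' := pvPopB bank len_bank n i st.length st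
  if (st'.length : Int) < n then st' ++ [i] else st'

def calc_joltage_alt (bank : List Int) (n : Int) : Int :=
  let len_bank : Int := bank.length
  let st := (PySem.List.pyRange 0 len_bank 1).foldl (pvStepB bank len_bank n) []
  (PySem.List.enumerate st 0).foldl
      (fun acc jr => acc + 10 ^ (n - jr.1 - 1).toNat * PySem.List.pyGetD bank jr.2 0) 0

-- ===== PRECONDITION & SPEC =====
-- Pre_ excludes exactly n > len(bank): there A always raises IndexError at the final sum
-- (its n strictly increasing chosen indices must exceed the list), so A never returns.
def Pre_calc_joltage (bank : List Int) (n : Int) : Prop := n ≤ (bank.length : Int)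
instance (bank : List Int) (n : Int) : Decidable (Pre_calc_joltage bank n) := by unfold Pre_calc_joltage; infer_instance

def pvWitness_calc_joltage : List Int × Int := ([3, 1, 4, 1, 5], 3)

def Spec_calc_joltage (bank : List Int) (n : Int) (out : Int) : Prop := out = calc_joltage_alt bank n
instance (bank : List Int) (n : Int) (out : Int) : Decidable (Spec_calc_joltage bank n out) := by unfold Spec_calc_joltage; infer_instance

-- ===== CLAIM (what is proved, stated in full; the proofs are below) =====
def Claim_equal_calc_joltage : Prop := ∀ (bank : List Int) (n : Int), Dom_calc_joltage bank n → Pre_calc_joltage bank n → Spec_calc_joltage bank n (calc_joltage bank n)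

-- ===== LEMMAS AND PROOFS =====

def pvV (bank : List Int) (x : Int) : Int := PySem.List.pyGetD bank x 0
abbrev pvCond (bank : List Int) (n i : Int) (p : Nat) (r : Int) : Prop :=
  (p : Int) + (bank.length : Int) - i ≥ n ∧ pvV bank r < pvV bank i
def pvFind (bank : List Int) (n i : Int) : Nat → List Int → Option Nat
  | _, [] => none
  | p, r :: rest => if pvCond bank n i p r then some p else pvFind bank n i (p + 1) rest

theorem pvFind_none (bank : List Int) (n i : Int) (q : Nat) (st : List Int)
    (h : pvFind bank n i q st = none) :
    ∀ p : Nat, (hp : p < st.length) → ¬ pvCond bank n i (q + p) (st[p]'hp) := by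
  induction st generalizing q with
  | nil => intro p hp; simp at hp
  | cons r rest ih =>
    rw [pvFind] at h
    split_ifs at h with hc
    intro p hp
    match p with
    | 0 => simpa using hc
    | p + 1 =>
      have := ih (q + 1) h p (by simpa using hp)
      simpa [Nat.add_assoc, Nat.add_comm 1 p] using this

theorem pvFind_some (bank : List Int) (n i : Int) (q j : Nat) (st : List Int)
    (h : pvFind bank n i q st = some j) :
    q ≤ j ∧ ∃ hj : j - q < st.length,
      pvCond bank n i j (st[j - q]'hj) ∧
      ∀ p : Nat, (hp : p < j - q) → ¬ pvCond bank n i (q + p) (st[p]'(by omega)) := by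
  induction st generalizing q with
  | nil => simp [pvFind] at h
  | cons r rest ih =>
    rw [pvFind] at h
    split_ifs at h with hc
    · cases h
      refine ⟨le_refl _, ⟨by simp, ?_, ?_⟩⟩
      · simpa using hc
      · intro p hp; exact absurd hp (by omega)
    · obtain ⟨hq, hj, hcj, hmin⟩ := ih (q + 1) h
      refine ⟨by omega, ?_⟩
      have hlt : j - q < (r :: rest).length := by simp; omega
      refine ⟨hlt, ?_, ?_⟩
      · have : j - q = (j - (q+1)) + 1 := by omega
        simp only [this, List.getElem_cons_succ]; exact hcj
      · intro p hp
        match p with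
        | 0 => simpa using hc
        | p + 1 =>
          have := hmin p (by omega)
          simpa [Nat.add_assoc, Nat.add_comm 1 p] using this

theorem pvInnerA_spec (bank : List Int) (n i : Int) (st pad : List Int) (q : Nat)
    (hst : ∀ r ∈ st, r < i) (hpad : ∀ r ∈ pad, i ≤ r) :
    pvInnerA bank (bank.length : Int) n i (q : Int) (st ++ pad) =
      match pvFind bank n i q st with
      | some j => st.take (j - q) ++ PySem.List.pyRange i (i + n - (j : Int)) 1
      | none => st ++ pad := by
  induction st generalizing q with
  | nil =>
    simp only [pvFind, List.nil_append]
    cases pad with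
    | nil => simp [pvInnerA]
    | cons r rest =>
      rw [pvInnerA]
      rw [if_pos (hpad r (by simp))]
  | cons r rest ih =>
    have hr : r < i := hst r (by simp)
    rw [pvFind, List.cons_append, pvInnerA, if_neg (by omega)]
    have hcond : (PySem.List.pyGetD bank i 0 > PySem.List.pyGetD bank r 0 ∧ (i + n - (q : Int)) - 1 < (bank.length : Int))
        ↔ pvCond bank n i q r := by
      unfold pvCond pvV
      constructor
      · rintro ⟨h1, h2⟩; exact ⟨by omega, h1⟩
      · rintro ⟨h1, h2⟩; exact ⟨h2, by omega⟩
    by_cases hc : pvCond bank n i q r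
    · rw [if_pos (hcond.mpr hc), if_pos hc]
      simp
    · rw [if_neg (fun h => hc (hcond.mp h)), if_neg hc]
      have : ((q : Int) + 1) = ((q + 1 : Nat) : Int) := by push_cast; ring
      rw [this, ih (q + 1) (fun x hx => hst x (by simp [hx]))]
      cases hf : pvFind bank n i (q + 1) rest with
      | none => simp
      | some j =>
        have hq1 : q + 1 ≤ j := (pvFind_some bank n i (q + 1) j rest hf).1
        simp only []
        have : j - q = (j - (q + 1)) + 1 := by omega
        rw [this, List.take_succ_cons, List.cons_append]

theorem pvFind_eq_none (bank : List Int) (n i : Int) (q : Nat) (st : List Int)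
    (h : ∀ p : Nat, (hp : p < st.length) → ¬ pvCond bank n i (q + p) (st[p]'hp)) :
    pvFind bank n i q st = none := by
  induction st generalizing q with
  | nil => rfl
  | cons r rest ih =>
    rw [pvFind, if_neg (by simpa using h 0 (by simp))]
    exact ih (q + 1) (fun p hp => by
      have := h (p + 1) (by simpa using hp)
      simpa [Nat.add_assoc, Nat.add_comm 1 p] using this)

theorem pvFind_eq_some (bank : List Int) (n i : Int) (q j : Nat) (st : List Int)
    (hq : q ≤ j) (hj : j - q < st.length)
    (hc : pvCond bank n i j (st[j - q]'hj))
    (hmin : ∀ p : Nat, (hp : p < j - q) → ¬ pvCond bank n i (q + p) (st[p]'(by omega))) :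
    pvFind bank n i q st = some j := by
  induction st generalizing q with
  | nil => simp at hj
  | cons r rest ih =>
    rw [pvFind]
    by_cases hqj : q = j
    · subst hqj
      rw [if_pos (by simpa using hc)]
    · have h0 : ¬ pvCond bank n i q r := by
        have := hmin 0 (by omega); simpa using this
      rw [if_neg h0]
      refine ih (q + 1) (by omega) (by simp at hj ⊢; omega) ?_ ?_
      · have : j - q = (j - (q + 1)) + 1 := by omega
        simp only [this, List.getElem_cons_succ] at hc
        exact hc
      · intro p hp
        have := hmin (p + 1) (by omega)
        simpa [Nat.add_assoc, Nat.add_comm 1 p] using this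

theorem pvChainLe (st : List Int) (f : Int → Int) (d p : Nat) (h : p + d < st.length)
    (hmono : ∀ r : Nat, p ≤ r → r < p + d → ∀ hr : r + 1 < st.length,
      ¬ f (st[r]'(by omega)) < f (st[r+1]'hr)) :
    f (st[p + d]'h) ≤ f (st[p]'(by omega)) := by
  induction d with
  | zero => simp
  | succ d ih =>
    have h1 : p + d + 1 < st.length := by omega
    have step := hmono (p + d) (by omega) (by omega) (by omega)
    have := ih (by omega) (fun r hr1 hr2 hr3 => hmono r hr1 (by omega) hr3)
    have heq : p + (d + 1) = (p + d) + 1 := by omega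
    simp only [heq]
    omega

theorem pvPopCond_iff (bank : List Int) (n i : Int) (t : Int) (ts : List Int) :
    (PySem.List.pyGetD bank ((t :: ts).getLast (by simp)) 0 < PySem.List.pyGetD bank i 0 ∧
        (((t :: ts).length : Int)) - 1 + ((bank.length : Int) - i) ≥ n)
      ↔ pvCond bank n i ((t :: ts).length - 1) ((t :: ts).getLast (by simp)) := by
  unfold pvCond pvV
  constructor
  · rintro ⟨h1, h2⟩
    refine ⟨?_, h1⟩
    have : ((t :: ts).length : Int) = (ts.length : Int) + 1 := by simp
    push_cast
    simp only [List.length_cons] at h2 ⊢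
    push_cast at h2
    omega
  · rintro ⟨h1, h2⟩
    refine ⟨h2, ?_⟩
    simp only [List.length_cons] at h1 ⊢
    push_cast at h1 ⊢
    omega

theorem pvPopB_none (bank : List Int) (n i : Int) (st : List Int)
    (h : pvFind bank n i 0 st = none) :
    pvPopB bank (bank.length : Int) n i st.length st = st := by
  cases st with
  | nil => rfl
  | cons t ts =>
    rw [List.length_cons, pvPopB]
    rw [if_neg]
    intro hC
    have hc := (pvPopCond_iff bank n i t ts).mp (by simpa using hC)
    have hlast : (t :: ts).getLast (by simp) = (t :: ts)[(t :: ts).length - 1]'(by simp) :=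
      List.getLast_eq_getElem _
    rw [hlast] at hc
    exact pvFind_none bank n i 0 (t :: ts) h ((t :: ts).length - 1) (by simp) (by simpa using hc)

theorem pvPopB_some (bank : List Int) (n i : Int) (st : List Int) (j : Nat)
    (hub : ∀ x ∈ st, x ≤ i - 1)
    (hinv : ∀ p : Nat, (hp : p + 1 < st.length) →
      pvV bank (st[p]'(by omega)) < pvV bank (st[p + 1]'hp) →
      (p : Int) + (bank.length : Int) - (st[p + 1]'hp) < n)
    (h : pvFind bank n i 0 st = some j) :
    pvPopB bank (bank.length : Int) n i st.length st = st.take j := by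
  induction hk : st.length using Nat.strong_induction_on generalizing st j with
  | _ k ih =>
  subst hk
  cases st with
  | nil => simp [pvFind] at h
  | cons t ts =>
    obtain ⟨-, hjlen, hcj0, hmin0⟩ := pvFind_some bank n i 0 j (t :: ts) h
    have hjl : j < (t :: ts).length := by omega
    have hcj : pvCond bank n i j ((t :: ts)[j]'hjl) := hcj0
    have hmin : ∀ p : Nat, (hp : p < j) → ¬ pvCond bank n i p ((t :: ts)[p]'(by omega)) := by
      intro p hp
      have := hmin0 p (by omega)
      simpa using this
    have hlen1 : 1 ≤ (t :: ts).length := by simp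
    -- the top element satisfies the pop condition
    have htoplt : pvV bank ((t :: ts)[(t :: ts).length - 1]'(by omega)) < pvV bank i := by
      by_cases hje : j = (t :: ts).length - 1
      · subst hje; exact hcj.2
      · by_contra hge
        have hnoinc : ¬ (∀ r : Nat, j ≤ r → r < j + ((t :: ts).length - 1 - j) →
            ∀ hr : r + 1 < (t :: ts).length,
            ¬ pvV bank ((t :: ts)[r]'(by omega)) < pvV bank ((t :: ts)[r+1]'hr)) := by
          intro hall
          have := pvChainLe (t :: ts) (pvV bank) ((t :: ts).length - 1 - j) j (by omega) hall
          have hj2 : j + ((t :: ts).length - 1 - j) = (t :: ts).length - 1 := by omega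
          simp only [hj2] at this
          have := hcj.2
          omega
        push_neg at hnoinc
        obtain ⟨r, hr1, hr2, hr3, hr4⟩ := hnoinc
        have hblock := hinv r hr3 hr4
        have hubr : (t :: ts)[r+1]'hr3 ≤ i - 1 := hub _ (by exact List.getElem_mem _)
        have hroom := hcj.1
        omega
    have hC : pvCond bank n i ((t :: ts).length - 1) ((t :: ts).getLast (by simp)) := by
      refine ⟨?_, ?_⟩
      · have h1 := hcj.1
        have : (j : Int) ≤ (((t :: ts).length - 1 : Nat) : Int) := by push_cast; omega
        omega
      · rw [List.getLast_eq_getElem]; exact htoplt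
    rw [List.length_cons, pvPopB, if_pos ((pvPopCond_iff bank n i t ts).mpr hC)]
    have hdll : ((t :: ts).dropLast).length = (t :: ts).length - 1 := by simp
    have hdl : (t :: ts).dropLast = (t :: ts).take ((t :: ts).length - 1) := by
      rw [List.dropLast_eq_take]
    have hget : ∀ p : Nat, (hp : p < (t :: ts).length - 1) →
        ((t :: ts).dropLast)[p]'(by omega) = (t :: ts)[p]'(by omega) := by
      intro p hp
      simp [hdl]
    by_cases hje : j = (t :: ts).length - 1
    · have hnone : pvFind bank n i 0 ((t :: ts).dropLast) = none := by
        apply pvFind_eq_none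
        intro p hp
        rw [hget p (by omega)]
        exact (by simpa using hmin p (by omega))
      have := pvPopB_none bank n i ((t :: ts).dropLast) hnone
      rw [hdll] at this
      simp only [List.length_cons, Nat.add_sub_cancel] at this
      rw [this, hdl, hje]
    · have hjlt : j < (t :: ts).length - 1 := by omega
      have hsome : pvFind bank n i 0 ((t :: ts).dropLast) = some j := by
        apply pvFind_eq_some bank n i 0 j _ (by omega) (by omega)
        · rw [hget (j - 0) (by omega)]
          exact hcj
        · intro p hp
          rw [hget p (by omega)]
          exact (by simpa using hmin p (by omega))
      have hrec := ih ((t :: ts).dropLast).length (by omega) ((t :: ts).dropLast) j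
        (fun x hx => hub x (List.mem_of_mem_dropLast hx))
        (fun p hp h1 => by
          rw [hget p (by omega), hget (p+1) (by omega)] at h1
          rw [hget (p+1) (by omega)]
          exact hinv p (by omega) h1)
        hsome rfl
      have hdll2 : ((t :: ts).dropLast).length = ts.length := by simp
      rw [hdll2] at hrec
      rw [hrec, hdl, List.take_take]
      congr 1
      omega

def pvPad (n : Int) (st : List Int) : List Int :=
  st ++ PySem.List.pyRange (st.getLastD (-1) + 1) (st.getLastD (-1) + 1 + (n - st.length)) 1

def pvInv (bank : List Int) (n i : Int) (st : List Int) : Prop :=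
  (∀ x ∈ st, x ≤ i - 1) ∧
  (st.length : Int) ≤ n ∧
  (st.length : Int) + ((bank.length : Int) - i) ≥ n ∧
  ((st.length : Int) = n ∨ st.getLastD (-1) = i - 1) ∧
  (∀ p : Nat, (hp : p + 1 < st.length) →
    pvV bank (st[p]'(by omega)) < pvV bank (st[p + 1]'hp) →
    (p : Int) + (bank.length : Int) - (st[p + 1]'hp) < n)

theorem pvGetConcat (l : List Int) (x : Int) (p : Nat) (hp : p = l.length) :
    (l ++ [x])[p]'(by simp; omega) = x := by
  subst hp; simp

theorem pvStep (bank : List Int) (n i : Int) (st : List Int)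
    (hi1 : 1 ≤ i) (hiL : i < (bank.length : Int)) (hn : 1 ≤ n)
    (hinv : pvInv bank n i st) :
    pvInnerA bank (bank.length : Int) n i 0 (pvPad n st) =
      pvPad n (pvStepB bank (bank.length : Int) n st i) ∧
    pvInv bank n (i + 1) (pvStepB bank (bank.length : Int) n st i) := by
  obtain ⟨hub, hklen, hfeas, hfill, hadj⟩ := hinv
  have hub' : ∀ x ∈ st, x < i := fun x hx => by have := hub x hx; omega
  have hpadmem : ∀ r ∈ PySem.List.pyRange (st.getLastD (-1) + 1)
      (st.getLastD (-1) + 1 + (n - st.length)) 1, i ≤ r := by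
    intro r hr
    rcases hfill with hkn | hlast
    · rw [PySem.List.pyRange_one_eq_nil (by omega)] at hr
      simp at hr
    · rw [hlast] at hr
      have := (PySem.List.mem_pyRange_one.mp hr).1
      omega
  have hA0 := pvInnerA_spec bank n i st
      (PySem.List.pyRange (st.getLastD (-1) + 1) (st.getLastD (-1) + 1 + (n - st.length)) 1)
      0 hub' hpadmem
  rw [Nat.cast_zero] at hA0
  cases hf : pvFind bank n i 0 st with
  | some j =>
    rw [hf] at hA0
    dsimp only at hA0
    rw [Nat.sub_zero] at hA0
    obtain ⟨-, hjlen, hcj, hmin⟩ := pvFind_some bank n i 0 j st hf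
    simp only [Nat.sub_zero] at hjlen
    have hcj' : pvCond bank n i j (st[j]'hjlen) := hcj
    have hmin' : ∀ p : Nat, (hp : p < j) → ¬ pvCond bank n i p (st[p]'(by omega)) := by
      intro p hp
      have := hmin p (by omega)
      simpa using this
    have hpop := pvPopB_some bank n i st j hub hadj hf
    have hjint : (j : Int) + 1 ≤ (st.length : Int) := by exact_mod_cast hjlen
    have hlenN : (st.take j ++ [i]).length = j + 1 := by
      rw [List.length_append, List.length_take]
      simp
      omega
    have hjn : ((st.take j).length : Int) < n := by
      rw [List.length_take]
      have : min j st.length = j := by omega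
      rw [this]
      omega
    have hBdef : pvStepB bank (bank.length : Int) n st i = st.take j ++ [i] := by
      rw [pvStepB]
      simp only [hpop, if_pos hjn]
    rw [hBdef]
    have hlastB : ((st.take j ++ [i]).getLastD (-1)) = i := by simp
    have hlenB : ((st.take j ++ [i]).length : Int) = (j : Int) + 1 := by
      rw [hlenN]; push_cast; ring
    constructor
    · show pvInnerA bank (bank.length : Int) n i 0 (pvPad n st) = _
      rw [pvPad, hA0, pvPad, hlastB, hlenB]
      have hrange : PySem.List.pyRange i (i + n - (j : Int)) 1 =
          i :: PySem.List.pyRange (i + 1) (i + 1 + (n - ((j : Int) + 1))) 1 := by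
        have h1 : i < i + n - (j : Int) := by omega
        rw [PySem.List.pyRange_one_cons h1]
        congr 1
        ring_nf
      rw [hrange, List.append_assoc]
      rfl
    · refine ⟨?_, ?_, ?_, ?_, ?_⟩
      · intro x hx
        rcases List.mem_append.mp hx with hx | hx
        · have := hub x (List.mem_of_mem_take hx); omega
        · simp at hx; omega
      · rw [hlenB]; omega
      · rw [hlenB]
        have := hcj'.1
        omega
      · right; rw [hlastB]; ring
      · intro p hp h1
        rw [hlenN] at hp
        have hgete : ∀ q : Nat, (hq : q < j) →
            (st.take j ++ [i])[q]'(by rw [hlenN]; omega) = st[q]'(by omega) := by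
          intro q hq
          rw [List.getElem_append_left (by rw [List.length_take]; omega)]
          simp [List.getElem_take]
        by_cases hpj : p + 1 = j
        · rw [hgete p (by omega)] at h1
          have h2 : (st.take j ++ [i])[p+1]'(by rw [hlenN]; omega) = i :=
            pvGetConcat (st.take j) i (p+1) (by rw [List.length_take]; omega)
          rw [h2] at h1 ⊢
          have hm := hmin' p (by omega)
          unfold pvCond at hm
          push_neg at hm
          have hnr : ¬ ((p : Int) + (bank.length : Int) - i ≥ n) :=
            fun hr => absurd h1 (not_lt.mpr (hm hr))
          omega
        · have hpj2 : p + 1 < j := by omega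
          rw [hgete p (by omega), hgete (p+1) (by omega)] at h1
          rw [hgete (p+1) (by omega)]
          exact hadj p (by omega) h1
  | none =>
    rw [hf] at hA0
    dsimp only at hA0
    have hpop := pvPopB_none bank n i st hf
    have hfail := pvFind_none bank n i 0 st hf
    by_cases hkn : (st.length : Int) < n
    · -- push without pop
      have hBdef : pvStepB bank (bank.length : Int) n st i = st ++ [i] := by
        rw [pvStepB]
        simp only [hpop, if_pos hkn]
      have hlast : st.getLastD (-1) = i - 1 := by
        rcases hfill with h | h
        · omega
        · exact h
      rw [hBdef]
      have hlastB : ((st ++ [i]).getLastD (-1)) = i := by simp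
      have hlenN : (st ++ [i]).length = st.length + 1 := by simp
      have hlenB : ((st ++ [i]).length : Int) = (st.length : Int) + 1 := by
        rw [hlenN]; push_cast; ring
      constructor
      · show pvInnerA bank (bank.length : Int) n i 0 (pvPad n st) = _
        rw [pvPad, hA0, pvPad, hlastB, hlenB, hlast]
        have h1 : i - 1 + 1 = i := by ring
        rw [h1]
        have hrange : PySem.List.pyRange i (i + (n - (st.length : Int))) 1 =
            i :: PySem.List.pyRange (i + 1) (i + 1 + (n - ((st.length : Int) + 1))) 1 := by
          rw [PySem.List.pyRange_one_cons (by omega)]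
          congr 1
          ring_nf
        rw [hrange, List.append_assoc]
        rfl
      · refine ⟨?_, ?_, ?_, ?_, ?_⟩
        · intro x hx
          rcases List.mem_append.mp hx with hx | hx
          · have := hub x hx; omega
          · simp at hx; omega
        · rw [hlenB]; omega
        · rw [hlenB]; omega
        · right; rw [hlastB]; ring
        · intro p hp h1
          rw [hlenN] at hp
          have hgete : ∀ q : Nat, (hq : q < st.length) →
              (st ++ [i])[q]'(by rw [hlenN]; omega) = st[q]'hq := by
            intro q hq
            rw [List.getElem_append_left hq]
          by_cases hpj : p + 1 = st.length
          · rw [hgete p (by omega)] at h1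
            have h2 : (st ++ [i])[p+1]'(by rw [hlenN]; omega) = i :=
              pvGetConcat st i (p+1) (by omega)
            rw [h2] at h1 ⊢
            have hm := hfail p (by omega)
            unfold pvCond at hm
            push_neg at hm
            rw [Nat.zero_add] at hm
            have hnr : ¬ ((p : Int) + (bank.length : Int) - i ≥ n) :=
              fun hr => absurd h1 (not_lt.mpr (hm hr))
            omega
          · have hpj2 : p + 1 < st.length := by omega
            rw [hgete p (by omega), hgete (p+1) (by omega)] at h1
            rw [hgete (p+1) (by omega)]
            exact hadj p (by omega) h1
    · -- the stack is already full: nothing changes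
      have hkeq : (st.length : Int) = n := by omega
      have hBdef : pvStepB bank (bank.length : Int) n st i = st := by
        rw [pvStepB]
        simp only [hpop, if_neg hkn]
      rw [hBdef]
      refine ⟨?_, ?_, ?_, ?_, ?_, ?_⟩
      · show pvInnerA bank (bank.length : Int) n i 0 (pvPad n st) = _
        rw [pvPad, hA0]
      · intro x hx; have := hub x hx; omega
      · omega
      · omega
      · left; omega
      · exact hadj

theorem pvFold (bank : List Int) (n : Int) (hn : 1 ≤ n) (hnL : n ≤ (bank.length : Int))
    (m : Nat) (h1 : 1 ≤ m) (hm : (m : Int) ≤ (bank.length : Int)) :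
    ((PySem.List.pyRange 1 (m : Int) 1).foldl
        (fun res i => pvInnerA bank (bank.length : Int) n i 0 res) (PySem.List.pyRange 0 n 1) =
      pvPad n ((PySem.List.pyRange 1 (m : Int) 1).foldl (pvStepB bank (bank.length : Int) n) [0])) ∧
    pvInv bank n (m : Int) ((PySem.List.pyRange 1 (m : Int) 1).foldl (pvStepB bank (bank.length : Int) n) [0]) := by
  induction m, h1 using Nat.le_induction with
  | base =>
    rw [Nat.cast_one, PySem.List.pyRange_one_eq_nil (le_refl 1)]
    simp only [List.foldl_nil]
    constructor
    · rw [pvPad]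
      have : ([(0 : Int)].getLastD (-1) + 1) = 1 := by simp
      rw [this]
      have hlen : (1 : Int) + (n - ([(0 : Int)].length : Int)) = n := by simp
      rw [hlen]
      rw [PySem.List.pyRange_one_cons (by omega)]
      rfl
    · refine ⟨?_, ?_, ?_, ?_, ?_⟩
      · intro x hx; simp at hx; omega
      · simp; omega
      · simp; omega
      · right; simp
      · intro p hp; simp at hp
  | succ m h1 ih =>
    have hmL : (m : Int) < (bank.length : Int) := by push_cast at hm ⊢; omega
    obtain ⟨iheq, ihinv⟩ := ih (by omega)
    have hsplit : PySem.List.pyRange 1 ((m + 1 : Nat) : Int) 1 =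
        PySem.List.pyRange 1 (m : Int) 1 ++ [(m : Int)] := by
      push_cast
      rw [PySem.List.pyRange_one_succ_right (by exact_mod_cast h1)]
    rw [hsplit, List.foldl_append, List.foldl_append]
    simp only [List.foldl_cons, List.foldl_nil]
    rw [iheq]
    have hstep := pvStep bank n (m : Int)
      ((PySem.List.pyRange 1 (m : Int) 1).foldl (pvStepB bank (bank.length : Int) n) [0])
      (by exact_mod_cast h1) hmL hn ihinv
    refine ⟨hstep.1, ?_⟩
    have : ((m + 1 : Nat) : Int) = (m : Int) + 1 := by push_cast; ring
    rw [this]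
    exact hstep.2

theorem pvFoldA_nil (bank : List Int) (n : Int) (l : List Int) :
    l.foldl (fun res i => pvInnerA bank (bank.length : Int) n i 0 res) [] = [] := by
  induction l with
  | nil => rfl
  | cons x xs ih => rw [List.foldl_cons]; exact ih

theorem pvFoldB_nil (bank : List Int) (n : Int) (hn : n ≤ 0) (l : List Int) :
    l.foldl (pvStepB bank (bank.length : Int) n) [] = [] := by
  induction l with
  | nil => rfl
  | cons x xs ih =>
    have h0 : pvStepB bank (bank.length : Int) n [] x = [] := by
      have he : pvStepB bank (bank.length : Int) n [] x =
          if ((0 : Nat) : Int) < n then [x] else [] := rfl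
      rw [he, if_neg (by simp; omega)]
    simpa [h0] using ih

theorem pv_main (bank : List Int) (n : Int) (hpre : n ≤ (bank.length : Int)) :
    calc_joltage bank n = calc_joltage_alt bank n := by
  by_cases hn : n ≤ 0
  · simp only [calc_joltage, calc_joltage_alt]
    rw [PySem.List.pyRange_one_eq_nil hn]
    rw [pvFoldA_nil, pvFoldB_nil bank n hn]
  · push_neg at hn
    simp only [calc_joltage, calc_joltage_alt]
    have hL1 : (0 : Int) < (bank.length : Int) := by omega
    rw [PySem.List.pyRange_one_cons hL1, List.foldl_cons]
    have h0 : pvStepB bank (bank.length : Int) n [] 0 = [0] := by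
      have he : pvStepB bank (bank.length : Int) n [] 0 =
          if ((0 : Nat) : Int) < n then [(0 : Int)] else [] := rfl
      rw [he, if_pos (by simp; omega)]
    rw [h0]
    have hm1 : 1 ≤ bank.length := by
      by_contra h
      have : bank.length = 0 := by omega
      rw [this] at hpre
      simp at hpre
      omega
    obtain ⟨heq, hinv⟩ := pvFold bank n (by omega) hpre bank.length hm1 (le_refl _)
    obtain ⟨-, hklen, hfeas, -, -⟩ := hinv
    set stB := (PySem.List.pyRange 1 ((bank.length : Nat) : Int) 1).foldl
        (pvStepB bank (bank.length : Int) n) [0] with hstB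
    have hk : n - (stB.length : Int) = 0 := by omega
    have hpad : pvPad n stB = stB := by
      rw [pvPad, hk]
      rw [PySem.List.pyRange_one_eq_nil (by omega)]
      simp
    rw [heq, hpad]
    norm_num
    rw [← hstB]

-- ===== VERDICT (by name: the statement is the Claim_ definition above) =====
theorem calc_joltage_spec : Claim_equal_calc_joltage := by
  intro bank n _ hpre
  unfold Pre_calc_joltage at hpre
  unfold Spec_calc_joltage
  exact pv_main bank n hpre
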